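-- pv_equiv track=rewrite | github.com/kieranpjobrien/nas-av1-pipeline | tools/maintain.py | _extract_lang_flags
-- ===== SOURCE A (Python) =====
-- def _extract_lang_flags(sidecar_stem: str) -> str:
--     """Extract the trailing ``.lang[.flag]`` suffix from a sidecar stem."""
--     parts = sidecar_stem.rsplit(".", 3)
--     tail: list[str] = []
--     for part in reversed(parts[1:]):
--         if len(part) <= 4 and part.isalpha():
--             tail.insert(0, part)
--         else:
--             break
--     return ("." + ".".join(tail)) if tail else ""
-- ===== SOURCE B (Python) =====
-- import re
--
-- # Anchored regex: 1-3 trailing groups of "." + 1-4 letters ([^\W\d_] = Unicode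
-- # letter, exactly str.isalpha's class on ASCII); search's leftmost match is the
-- # longest such suffix, the end anchor reproduces the stop-at-first-bad-segment
-- # behaviour and the leading dot of each group keeps the first segment excluded.
-- _LANG_RE = re.compile(r"(?:\.[^\W\d_]{1,4}){1,3}\Z", re.UNICODE)
--
--
-- def _extract_lang_flags(sidecar_stem: str) -> str:
--     """Extract the trailing ``.lang[.flag]`` suffix from a sidecar stem."""
--     m = _LANG_RE.search(sidecar_stem)
--     return m.group(0) if m else ""
-- ===== Notes on version B (the rewrite author's own statement) =====
-- stated objective: idiomatic
-- what changed: Replaced the rsplit plus reversed-loop-with-break segment collection by a single precompiled end-anchored regex search (one to three groups of a dot followed by one to four letters, anchored at the end of the string) whose leftmost match is returned directly.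
import Mathlib
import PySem

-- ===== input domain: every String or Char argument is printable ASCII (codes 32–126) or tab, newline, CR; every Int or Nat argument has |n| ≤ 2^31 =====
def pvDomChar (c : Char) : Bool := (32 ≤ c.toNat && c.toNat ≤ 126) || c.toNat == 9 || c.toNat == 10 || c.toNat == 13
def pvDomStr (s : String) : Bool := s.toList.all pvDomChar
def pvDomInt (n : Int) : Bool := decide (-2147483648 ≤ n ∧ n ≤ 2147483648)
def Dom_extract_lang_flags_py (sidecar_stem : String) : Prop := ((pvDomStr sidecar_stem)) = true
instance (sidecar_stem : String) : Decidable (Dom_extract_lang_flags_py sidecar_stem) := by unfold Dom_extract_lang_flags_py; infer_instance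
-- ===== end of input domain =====

-- B replaces A's rsplit + reverse-loop with a single anchored-regex search (more idiomatic; same cost).

-- ===== PORT A =====
-- s.split("."): hand port (PySem has no rsplit); structural recursion, exact for a one-char separator.
def pvSplitDot : List Char → List (List Char)
  | [] => [[]]
  | c :: cs =>
    match pvSplitDot cs with
    | [] => []  -- unreachable: pvSplitDot never returns []
    | p :: ps => if c = '.' then [] :: p :: ps else (c :: p) :: ps

-- s.rsplit(".", 3): hand port, exact — Python splits at the LAST three separators,
-- i.e. full split with everything before the last three '.' rejoined as the first piece.
def pvRsplitDot3 (cs : List Char) : List (List Char) :=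
  let segs := pvSplitDot cs
  if segs.length ≤ 4 then segs
  else PySem.Chars.join ['.'] (segs.take (segs.length - 3)) :: segs.drop (segs.length - 3)

-- 'len(part) <= 4 and part.isalpha()', in A's order
def pvOk (p : List Char) : Bool := decide (p.length ≤ 4) && PySem.Chars.strIsalpha p

-- 'for part in reversed(parts[1:]): if ok: tail.insert(0, part) else: break'
def pvTailLoop : List (List Char) → List (List Char) → List (List Char)
  | [], tail => tail
  | p :: ps, tail => if pvOk p then pvTailLoop ps (p :: tail) else tail

def extract_lang_flags_py (sidecar_stem : String) : String :=
  let parts := pvRsplitDot3 sidecar_stem.toList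
  let tail := pvTailLoop ((parts.drop 1).reverse) []
  if !tail.isEmpty then String.ofList ('.' :: PySem.Chars.join ['.'] tail) else ""

-- ===== PORT B =====
-- Hand port of re.search(r"(?:\.[^\W\d_]{1,4}){1,3}\Z", s): PySem has no regex engine.
-- [^\W\d_] is the letter class; PySem.Chars.isalpha is exact for it on the ASCII domain.
-- A group is '.' + a greedy run of 1-4 letters; since letters never match '.', the
-- engine's backtracking inside {1,4} can never rescue a failed greedy run, so the
-- match test takes the whole letter run and checks its length — exact.
def pvGroupsMatch : Nat → List Char → Bool
  | _, [] => false
  | 0, _ => false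
  | Nat.succ k, c :: rest =>
    c == '.' &&
    (let seg := rest.takeWhile PySem.Chars.isalpha
     decide (1 ≤ seg.length) && decide (seg.length ≤ 4) &&
     (let rem := rest.drop seg.length
      rem.isEmpty || pvGroupsMatch k rem))

-- re.search: try each start offset left to right, return the first (= leftmost) match;
-- the pattern is \Z-anchored, so a match from offset i is the whole suffix from i.
def pvSearch : List Char → Option (List Char)
  | [] => none
  | c :: cs => if pvGroupsMatch 3 (c :: cs) then some (c :: cs) else pvSearch cs

def extract_lang_flags_py_alt (sidecar_stem : String) : String :=
  match pvSearch sidecar_stem.toList with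
  | some l => String.ofList l
  | none => ""

-- ===== PRECONDITION & SPEC =====
def Spec_extract_lang_flags_py (sidecar_stem : String) (out : String) : Prop := out = extract_lang_flags_py_alt sidecar_stem
instance (sidecar_stem : String) (out : String) : Decidable (Spec_extract_lang_flags_py sidecar_stem out) := by unfold Spec_extract_lang_flags_py; infer_instance

-- ===== CLAIM (what is proved, stated in full; the proofs are below) =====
def Claim_equal_extract_lang_flags_py : Prop := ∀ (sidecar_stem : String), Dom_extract_lang_flags_py sidecar_stem → Spec_extract_lang_flags_py sidecar_stem (extract_lang_flags_py sidecar_stem)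

-- ===== LEMMAS AND PROOFS =====

-- 'ok' with the emptiness test folded in: 1 ≤ len ∧ len ≤ 4 ∧ all letters
def pvOk' (p : List Char) : Bool :=
  decide (1 ≤ p.length) && decide (p.length ≤ 4) && p.all PySem.Chars.isalpha

theorem pvOk_eq (p : List Char) : pvOk p = pvOk' p := by
  cases p <;> simp [pvOk, pvOk', PySem.Chars.strIsalpha]

-- segment-level form of the pattern: 1-k groups, each an ok' segment, to the end
def pvMatchSegs : Nat → List (List Char) → Bool
  | _, [] => false
  | 0, _ => false
  | Nat.succ k, p :: ps => pvOk' p && (ps.isEmpty || pvMatchSegs k ps)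

theorem pvMatchSegs_eq (k : Nat) (q : List (List Char)) :
    pvMatchSegs k q = (!q.isEmpty && decide (q.length ≤ k) && q.all pvOk') := by
  induction k generalizing q with
  | zero => cases q <;> simp [pvMatchSegs]
  | succ k ih =>
    cases q with
    | nil => simp [pvMatchSegs]
    | cons p ps =>
      cases ps with
      | nil => simp [pvMatchSegs]
      | cons q qs =>
        simp only [pvMatchSegs, ih, List.isEmpty_cons, List.length_cons, List.all_cons,
          Bool.not_false, Bool.true_and]
        cases hp : pvOk' p <;> cases hq : pvOk' q <;> cases hall : (qs.all pvOk') <;> simp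

-- segment-level form of the search
def pvSearchSegs : List (List Char) → Option (List Char)
  | [] => none
  | p :: ps => if pvMatchSegs 3 (p :: ps) then some ('.' :: PySem.Chars.join ['.'] (p :: ps)) else pvSearchSegs ps

theorem pvSplitDot_ne_nil (cs : List Char) : pvSplitDot cs ≠ [] := by
  induction cs with
  | nil => simp [pvSplitDot]
  | cons c cs ih =>
    cases h : pvSplitDot cs with
    | nil => exact absurd h ih
    | cons p ps => simp only [pvSplitDot, h]; split <;> simp

theorem pvJoin_pvSplitDot (cs : List Char) : PySem.Chars.join ['.'] (pvSplitDot cs) = cs := by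
  induction cs with
  | nil => simp [pvSplitDot, PySem.Chars.join_singleton]
  | cons c cs ih =>
    cases h : pvSplitDot cs with
    | nil => exact absurd h (pvSplitDot_ne_nil cs)
    | cons p ps =>
      rw [h] at ih
      simp only [pvSplitDot, h]
      by_cases hc : c = '.'
      · subst hc
        rw [if_pos rfl, PySem.Chars.join_cons_cons]
        simpa using ih
      · rw [if_neg hc]
        cases ps with
        | nil =>
          simp only [PySem.Chars.join_singleton] at ih ⊢
          simp [ih]
        | cons q qs =>
          simp only [PySem.Chars.join_cons_cons] at ih ⊢
          simp [ih]

theorem pvSplitDot_noDot (cs : List Char) : ∀ p ∈ pvSplitDot cs, '.' ∉ p := by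
  induction cs with
  | nil => simp [pvSplitDot]
  | cons c cs ih =>
    cases h : pvSplitDot cs with
    | nil => exact absurd h (pvSplitDot_ne_nil cs)
    | cons p ps =>
      rw [h] at ih
      simp only [pvSplitDot, h]
      by_cases hc : c = '.'
      · subst hc; rw [if_pos rfl]
        intro q hq
        simp at hq
        rcases hq with hq | hq | hq
        · simp [hq]
        · exact ih q (by simp [hq])
        · exact ih q (by simp [hq])
      · rw [if_neg hc]
        intro q hq
        simp at hq
        rcases hq with hq | hq
        · subst hq
          intro hmem
          simp at hmem
          rcases hmem with h1 | h1
          · exact hc h1.symm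
          · exact ih p (by simp) h1
        · exact ih q (by simp [hq])

theorem pvTailLoop_eq (l acc : List (List Char)) :
    pvTailLoop l acc = (l.takeWhile pvOk).reverse ++ acc := by
  induction l generalizing acc with
  | nil => simp [pvTailLoop]
  | cons p ps ih =>
    simp only [pvTailLoop, List.takeWhile_cons]
    cases h : pvOk p <;> simp [ih]

theorem pvDrop_takeWhile (q : Char → Bool) (l : List Char) :
    l.drop (l.takeWhile q).length = l.dropWhile q := by
  induction l with
  | nil => simp
  | cons a l ih =>
    by_cases h : q a <;> simp [h, ih]

-- one pattern group over a dot-free segment followed by nothing or a dot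
theorem pvGroupsMatch_group (k : Nat) (p rest : List Char) (hp : '.' ∉ p)
    (hrest : rest = [] ∨ ∃ r, rest = '.' :: r) :
    pvGroupsMatch (k + 1) ('.' :: (p ++ rest)) =
      (pvOk' p && (rest.isEmpty || pvGroupsMatch k rest)) := by
  have hdotalpha : PySem.Chars.isalpha '.' = false := by decide
  have hrestTW : rest.takeWhile PySem.Chars.isalpha = [] := by
    rcases hrest with h | ⟨r, h⟩ <;> simp [h, hdotalpha]
  simp only [pvGroupsMatch, beq_self_eq_true, Bool.true_and]
  by_cases hall : p.all PySem.Chars.isalpha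
  · -- the whole segment is letters: the greedy run is exactly p, the remainder is rest
    have htwp : p.takeWhile PySem.Chars.isalpha = p :=
      List.takeWhile_eq_self_iff.mpr (List.all_eq_true.mp hall)
    have hseg : (p ++ rest).takeWhile PySem.Chars.isalpha = p := by
      rw [List.takeWhile_append, htwp]
      simp [hrestTW]
    rw [hseg]
    have hdrop : (p ++ rest).drop p.length = rest := List.drop_left
    rw [hdrop]
    simp only [pvOk', hall, Bool.and_true]
  · -- p contains a non-letter: the run stops inside p, the remainder starts with a
    -- char that is neither a letter nor '.', so both sides are false
    have hseg : (p ++ rest).takeWhile PySem.Chars.isalpha = p.takeWhile PySem.Chars.isalpha := by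
      rw [List.takeWhile_append]
      have : (p.takeWhile PySem.Chars.isalpha).length ≠ p.length := by
        intro h
        have := List.takeWhile_prefix (l := p) (p := PySem.Chars.isalpha)
        have heq : p.takeWhile PySem.Chars.isalpha = p :=
          List.IsPrefix.eq_of_length this h
        exact hall (List.all_eq_true.mpr (List.takeWhile_eq_self_iff.mp heq))
      simp [this]
    rw [hseg]
    have hdw : p.dropWhile PySem.Chars.isalpha ≠ [] := by
      intro h
      exact hall (List.all_eq_true.mpr (List.dropWhile_eq_nil_iff.mp h))
    obtain ⟨d, t, hdt⟩ := List.exists_cons_of_ne_nil hdw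
    have hdnotalpha : PySem.Chars.isalpha d = false := by
      have := List.head?_dropWhile_not PySem.Chars.isalpha p
      rw [hdt] at this
      simpa using this
    have hdne : d ≠ '.' := by
      intro h
      apply hp
      have hsuf := List.dropWhile_suffix (l := p) PySem.Chars.isalpha
      rw [hdt] at hsuf
      exact hsuf.mem (by simp [h])
    have hdrop : (p ++ rest).drop (p.takeWhile PySem.Chars.isalpha).length
        = (d :: t) ++ rest := by
      have h1 : (p.takeWhile PySem.Chars.isalpha).length ≤ p.length :=
        List.IsPrefix.length_le (List.takeWhile_prefix _)
      rw [List.drop_append_of_le_length h1, pvDrop_takeWhile, hdt]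
    rw [hdrop]
    have hrem : pvGroupsMatch k (d :: (t ++ rest)) = false := by
      cases k <;> simp [pvGroupsMatch, hdne]
    have hokfalse : pvOk' p = false := by simp [pvOk', hall]
    simp [hrem, hokfalse]

theorem pvGroupsMatch_join (k : Nat) (ps : List (List Char)) (hne : ps ≠ [])
    (hdf : ∀ p ∈ ps, '.' ∉ p) :
    pvGroupsMatch (k + 1) ('.' :: PySem.Chars.join ['.'] ps) = pvMatchSegs (k + 1) ps := by
  induction ps generalizing k with
  | nil => cases hne rfl
  | cons p qs ih =>
    cases qs with
    | nil =>
      rw [PySem.Chars.join_singleton]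
      have := pvGroupsMatch_group k p [] (hdf p (by simp)) (Or.inl rfl)
      simp only [List.append_nil] at this
      rw [this]
      cases k <;> simp [pvMatchSegs, pvGroupsMatch]
    | cons q qs' =>
      rw [PySem.Chars.join_cons_cons]
      have hassoc : p ++ ['.'] ++ PySem.Chars.join ['.'] (q :: qs')
          = p ++ ('.' :: PySem.Chars.join ['.'] (q :: qs')) := by simp
      rw [hassoc, pvGroupsMatch_group k p _ (hdf p (by simp)) (Or.inr ⟨_, rfl⟩)]
      cases k with
      | zero => simp [pvMatchSegs, pvGroupsMatch]
      | succ k' =>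
        rw [ih k' (by simp) (fun x hx => hdf x (List.mem_cons_of_mem _ hx))]
        simp [pvMatchSegs]

theorem pvSearch_append (seg l : List Char) (hseg : '.' ∉ seg) :
    pvSearch (seg ++ l) = pvSearch l := by
  induction seg with
  | nil => simp
  | cons c cs ih =>
    have hc : c ≠ '.' := by intro h; exact hseg (by simp [h])
    have : pvGroupsMatch 3 (c :: (cs ++ l)) = false := by
      simp only [pvGroupsMatch]
      simp [hc]
    simp only [List.cons_append, pvSearch, this]
    exact ih (fun h => hseg (by simp [h]))

theorem pvSearch_join (p0 : List Char) (ps : List (List Char)) (hdf0 : '.' ∉ p0)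
    (hdf : ∀ p ∈ ps, '.' ∉ p) :
    pvSearch (PySem.Chars.join ['.'] (p0 :: ps)) = pvSearchSegs ps := by
  induction ps generalizing p0 with
  | nil =>
    rw [PySem.Chars.join_singleton, ← List.append_nil p0, pvSearch_append p0 [] hdf0]
    rfl
  | cons q qs ih =>
    rw [PySem.Chars.join_cons_cons]
    have hassoc : p0 ++ ['.'] ++ PySem.Chars.join ['.'] (q :: qs)
        = p0 ++ ('.' :: PySem.Chars.join ['.'] (q :: qs)) := by simp
    rw [hassoc, pvSearch_append p0 _ hdf0]
    have h3 : (3 : Nat) = 2 + 1 := rfl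
    rw [pvSearch, h3,
      pvGroupsMatch_join 2 (q :: qs) (by simp) hdf,
      ih q (hdf q (by simp)) (fun x hx => hdf x (List.mem_cons_of_mem _ hx))]
    rfl

theorem pvRTake_cons_of_not_all (p : List Char) (l : List (List Char))
    (h : ¬ (p :: l).all pvOk' = true) :
    (p :: l).reverse.takeWhile pvOk' = l.reverse.takeWhile pvOk' := by
  simp only [List.reverse_cons, List.takeWhile_append]
  by_cases hl : l.all pvOk' = true
  · have : l.reverse.takeWhile pvOk' = l.reverse :=
      List.takeWhile_eq_self_iff.mpr (by
        intro x hx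
        exact List.all_eq_true.mp hl x (List.mem_reverse.mp hx))
    have hp : pvOk' p = false := by
      cases hpp : pvOk' p
      · rfl
      · exact absurd (by simp [hpp, hl]) h
    simp [this, hp]
  · have hne : (l.reverse.takeWhile pvOk').length ≠ l.length := by
      intro hlen
      have heq : l.reverse.takeWhile pvOk' = l.reverse :=
        List.IsPrefix.eq_of_length (List.takeWhile_prefix _) (by simpa using hlen)
      exact hl (List.all_eq_true.mpr (by
        intro x hx
        exact List.takeWhile_eq_self_iff.mp heq x (List.mem_reverse.mpr hx)))
    simp [hne]

theorem pvFinal (ps : List (List Char)) :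
    (match pvSearchSegs ps with
     | some l => l
     | none => ([] : List Char)) =
    (if !(((ps.drop (ps.length - 3)).reverse.takeWhile pvOk').reverse).isEmpty
     then '.' :: PySem.Chars.join ['.'] (((ps.drop (ps.length - 3)).reverse.takeWhile pvOk').reverse)
     else []) := by
  induction ps with
  | nil => simp [pvSearchSegs]
  | cons p ps' ih =>
    by_cases hlen : (p :: ps').length ≤ 3
    · have hd0 : (p :: ps').length - 3 = 0 := by omega
      have hd0' : ps'.length - 3 = 0 := by simp at hlen; omega
      rw [hd0] at *
      rw [hd0'] at ih
      simp only [List.drop_zero] at ih ⊢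
      by_cases hm : pvMatchSegs 3 (p :: ps') = true
      · have hall : (p :: ps').all pvOk' = true := by
          rw [pvMatchSegs_eq] at hm
          simp at hm
          obtain ⟨-, hokp, hrest⟩ := hm
          exact List.all_eq_true.mpr (by
            intro x hx
            simp at hx
            rcases hx with h | h
            · subst h; exact hokp
            · exact hrest x h)
        have htw : (p :: ps').reverse.takeWhile pvOk' = (p :: ps').reverse :=
          List.takeWhile_eq_self_iff.mpr (by
            intro x hx
            exact List.all_eq_true.mp hall x (List.mem_reverse.mp hx))
        rw [pvSearchSegs, if_pos hm, htw]
        simp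
      · have hnotall : ¬ (p :: ps').all pvOk' = true := by
          intro hall
          apply hm
          rw [pvMatchSegs_eq]
          simp at hlen ⊢
          refine ⟨by omega, ?_⟩
          have := List.all_eq_true.mp hall
          exact ⟨this p (by simp), fun x hx => this x (by simp [hx])⟩
        rw [pvSearchSegs, if_neg hm, ih, pvRTake_cons_of_not_all p ps' hnotall]
    · have hm : pvMatchSegs 3 (p :: ps') = false := by
        rw [pvMatchSegs_eq]
        simp at hlen ⊢
        omega
      have hdrop : (p :: ps').drop ((p :: ps').length - 3) = ps'.drop (ps'.length - 3) := by
        have h1 : (p :: ps').length - 3 = (ps'.length - 3) + 1 := by simp at hlen ⊢; omega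
        rw [h1, List.drop_succ_cons]
      rw [pvSearchSegs, if_neg (by simp [hm]), ih, hdrop]

-- ===== VERDICT (by name: the statement is the Claim_ definition above) =====
theorem extract_lang_flags_py_spec : Claim_equal_extract_lang_flags_py := by
  intro s _
  unfold Spec_extract_lang_flags_py
  simp only [extract_lang_flags_py, extract_lang_flags_py_alt]
  obtain ⟨p0, ps, hsegs⟩ := List.exists_cons_of_ne_nil (pvSplitDot_ne_nil s.toList)
  have hdf0 : '.' ∉ p0 := pvSplitDot_noDot s.toList p0 (by rw [hsegs]; simp)
  have hdf : ∀ p ∈ ps, '.' ∉ p := fun p hp =>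
    pvSplitDot_noDot s.toList p (by rw [hsegs]; simp [hp])
  -- B's side: scanning the string is scanning the dot-separated segments
  have hcs : s.toList = PySem.Chars.join ['.'] (p0 :: ps) := by
    rw [← hsegs, pvJoin_pvSplitDot]
  have hB : pvSearch s.toList = pvSearchSegs ps := by
    rw [hcs, pvSearch_join p0 ps hdf0 hdf]
  -- A's side: parts[1:] is the last min(3, len-1) segments
  have hparts : (pvRsplitDot3 s.toList).drop 1 = ps.drop (ps.length - 3) := by
    unfold pvRsplitDot3
    rw [hsegs]
    by_cases h4 : (p0 :: ps).length ≤ 4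
    · rw [if_pos h4]
      have : ps.length - 3 = 0 := by simp at h4; omega
      simp [this]
    · rw [if_neg h4]
      have h1 : (p0 :: ps).length - 3 = (ps.length - 3) + 1 := by simp at h4 ⊢; omega
      simp only [List.drop_succ_cons]
      rw [h1, List.drop_succ_cons]
      simp
  have hokfun : pvOk = pvOk' := funext pvOk_eq
  rw [hB, hparts, pvTailLoop_eq, List.append_nil, hokfun]
  have hfin := pvFinal ps
  set t := ((ps.drop (ps.length - 3)).reverse.takeWhile pvOk').reverse with ht
  cases hb : t.isEmpty with
  | false =>
    rw [hb] at hfin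
    cases ho : pvSearchSegs ps with
    | none => rw [ho] at hfin; simp at hfin
    | some l =>
      rw [ho] at hfin
      simp only [Bool.not_false] at hfin
      simp only [Bool.not_false]
      rw [hfin]
      simp
  | true =>
    rw [hb] at hfin
    cases ho : pvSearchSegs ps with
    | none => simp
    | some l =>
      rw [ho] at hfin
      simp only [Bool.not_true] at hfin
      simp only [Bool.not_true, Bool.false_eq_true, if_false] at hfin ⊢
      rw [hfin]
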